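-- pv_equiv track=rewrite | github.com/evan-hataishi/ics-674 | mini_project/gene.py | __fill_rest
-- ===== SOURCE A (Python) =====
-- def __fill_rest(path, grid_size, step, x_pos, y_pos):
--     while (step < len(path)) and (x_pos < grid_size - 1):
--         path[step] = 'R'
--         x_pos += 1
--         step += 1
--     while (step < len(path)) and (y_pos < grid_size - 1):
--         path[step] = 'U'
--         y_pos += 1
--         step += 1
--     for i in range(step, len(path)):
--         path[i] = None
--     return path
-- ===== SOURCE B (Python) =====
-- def __fill_rest(path, grid_size, step, x_pos, y_pos):
--     # Closed-form: compute the R/U/None segment lengths arithmetically and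
--     # write them with one bulk slice assignment (mutates path in place, like A).
--     n = len(path)
--     total = n - step
--     if total <= 0:
--         return path
--     r = min(total, max(0, grid_size - 1 - x_pos))
--     u = min(total - r, max(0, grid_size - 1 - y_pos))
--     seq = ['R'] * r + ['U'] * u + [None] * (total - r - u)
--     start = max(step, 0)
--     path[start:] = seq[start - step:]
--     return path
-- ===== Notes on version B (the rewrite author's own statement) =====
-- stated objective: alternative
-- what changed: Replaces A's three per-cell write loops by closed-form arithmetic: the R/U/None segment lengths are computed directly and written with a single bulk slice assignment.
import Mathlib
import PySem

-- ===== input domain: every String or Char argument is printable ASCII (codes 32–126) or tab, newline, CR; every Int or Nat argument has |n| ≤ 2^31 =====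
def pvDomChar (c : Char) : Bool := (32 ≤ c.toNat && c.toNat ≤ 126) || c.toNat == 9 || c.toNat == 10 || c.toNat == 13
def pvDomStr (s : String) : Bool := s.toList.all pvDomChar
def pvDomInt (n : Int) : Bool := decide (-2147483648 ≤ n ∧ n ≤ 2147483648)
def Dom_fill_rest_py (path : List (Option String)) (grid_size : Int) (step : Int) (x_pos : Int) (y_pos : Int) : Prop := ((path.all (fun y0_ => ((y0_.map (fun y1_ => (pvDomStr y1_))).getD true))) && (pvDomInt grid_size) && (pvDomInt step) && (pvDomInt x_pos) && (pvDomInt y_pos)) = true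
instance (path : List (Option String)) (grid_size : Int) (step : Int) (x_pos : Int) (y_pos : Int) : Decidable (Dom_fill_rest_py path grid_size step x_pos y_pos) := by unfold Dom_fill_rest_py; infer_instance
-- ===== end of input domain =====

-- B computes the R/U/None segment lengths in closed form and writes them with one bulk
-- slice assignment instead of A's three per-cell loops; both mutate `path` in place in
-- Python, the equivalence proved here is about the returned value.

-- ===== PORT A =====
-- one `while` loop of A: while step < len(path) and pos < grid_size - 1: path[step] = lab; pos += 1; step += 1
def fillPhase (lab : Option String) (grid_size : Int) (path : List (Option String)) (step : Int) (pos : Int) : List (Option String) × Int × Int :=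
  if step < (path.length : Int) ∧ pos < grid_size - 1 then
    fillPhase lab grid_size (PySem.List.pySetD path step lab) (step + 1) (pos + 1)
  else (path, step, pos)
termination_by ((path.length : Int) - step).toNat
decreasing_by simp only [PySem.List.length_pySetD]; omega

def fill_rest_py (path : List (Option String)) (grid_size : Int) (step : Int) (x_pos : Int) (y_pos : Int) : List (Option String) :=
  let st1 := fillPhase (some "R") grid_size path step x_pos
  let st2 := fillPhase (some "U") grid_size st1.1 st1.2.1 y_pos
  (PySem.List.pyRange st2.2.1 (st2.1.length : Int) 1).foldl
    (fun p i => PySem.List.pySetD p i none) st2.1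

-- ===== PORT B =====
def fill_rest_py_alt (path : List (Option String)) (grid_size : Int) (step : Int) (x_pos : Int) (y_pos : Int) : List (Option String) :=
  let n : Int := path.length
  let total := n - step
  if total ≤ 0 then path
  else
    let r := min total (max 0 (grid_size - 1 - x_pos))
    let u := min (total - r) (max 0 (grid_size - 1 - y_pos))
    let seq := List.replicate r.toNat (some "R") ++ List.replicate u.toNat (some "U")
                 ++ List.replicate (total - r - u).toNat (none : Option String)
    let start := max step 0
    path.take start.toNat ++ seq.drop (start - step).toNat

-- ===== PRECONDITION & SPEC =====
-- Pre_ excludes exactly the inputs where A raises IndexError: step < -len(path)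
-- (the first list write, or the final for-loop, hits an out-of-range negative index).
def Pre_fill_rest_py (path : List (Option String)) (grid_size : Int) (step : Int) (x_pos : Int) (y_pos : Int) : Prop :=
  -(path.length : Int) ≤ step
instance (path : List (Option String)) (grid_size : Int) (step : Int) (x_pos : Int) (y_pos : Int) : Decidable (Pre_fill_rest_py path grid_size step x_pos y_pos) := by unfold Pre_fill_rest_py; infer_instance

def pvWitness_fill_rest_py : List (Option String) × Int × Int × Int × Int := ([some "R", none, none], 3, 1, 1, 0)

def Spec_fill_rest_py (path : List (Option String)) (grid_size : Int) (step : Int) (x_pos : Int) (y_pos : Int) (out : List (Option String)) : Prop := out = fill_rest_py_alt path grid_size step x_pos y_pos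
instance (path : List (Option String)) (grid_size : Int) (step : Int) (x_pos : Int) (y_pos : Int) (out : List (Option String)) : Decidable (Spec_fill_rest_py path grid_size step x_pos y_pos out) := by unfold Spec_fill_rest_py; infer_instance

-- ===== CLAIM (what is proved, stated in full; the proofs are below) =====
def Claim_equal_fill_rest_py : Prop := ∀ (path : List (Option String)) (grid_size : Int) (step : Int) (x_pos : Int) (y_pos : Int), Dom_fill_rest_py path grid_size step x_pos y_pos → Pre_fill_rest_py path grid_size step x_pos y_pos → Spec_fill_rest_py path grid_size step x_pos y_pos (fill_rest_py path grid_size step x_pos y_pos)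

-- ===== LEMMAS AND PROOFS =====

-- writes the labels of `seq` at consecutive Python indices s, s+1, … into path
def pvApplyW : List (Option String) → Int → List (Option String) → List (Option String)
  | [], _, path => path
  | v :: vs, s, path => pvApplyW vs (s + 1) (PySem.List.pySetD path s v)

theorem length_pvApplyW (seq : List (Option String)) : ∀ (s : Int) (path : List (Option String)), (pvApplyW seq s path).length = path.length := by
  induction seq with
  | nil => intro s path; rfl
  | cons v vs ih => intro s path; simp [pvApplyW, ih, PySem.List.length_pySetD]

theorem pvApplyW_append (xs ys : List (Option String)) : ∀ (s : Int) (path : List (Option String)),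
    pvApplyW (xs ++ ys) s path = pvApplyW ys (s + xs.length) (pvApplyW xs s path) := by
  induction xs with
  | nil => intro s path; simp [pvApplyW]
  | cons v vs ih =>
    intro s path
    simp only [List.cons_append, pvApplyW, ih, List.length_cons]
    have : s + 1 + (vs.length : Int) = s + ((vs.length : Int) + 1) := by ring
    rw [this]
    push_cast
    ring_nf

theorem fillPhase_eq (lab : Option String) (grid_size : Int) : ∀ (path : List (Option String)) (step pos : Int),
    fillPhase lab grid_size path step pos =
      (pvApplyW (List.replicate (max 0 (min ((path.length : Int) - step) (grid_size - 1 - pos))).toNat lab) step path,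
       step + max 0 (min ((path.length : Int) - step) (grid_size - 1 - pos)),
       pos + max 0 (min ((path.length : Int) - step) (grid_size - 1 - pos))) := by
  intro path step pos
  induction path, step, pos using fillPhase.induct lab grid_size with
  | case1 path step pos h ih =>
    rw [fillPhase, if_pos h]
    rw [ih]
    set n : Int := (path.length : Int) with hn
    have hlen : ((PySem.List.pySetD path step lab).length : Int) = n := by
      simp only [PySem.List.length_pySetD]; exact hn.symm
    rw [hlen] at ih ⊢
    have hc : max 0 (min (n - (step + 1)) (grid_size - 1 - (pos + 1)))
        = max 0 (min (n - step) (grid_size - 1 - pos)) - 1 := by omega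
    set c := max 0 (min (n - step) (grid_size - 1 - pos)) with hcdef
    have hc1 : 1 ≤ c := by omega
    have hrep : List.replicate c.toNat lab = lab :: List.replicate (c - 1).toNat lab := by
      have : c.toNat = (c - 1).toNat + 1 := by omega
      rw [this, List.replicate_succ]
    rw [hc, hrep]
    simp only [pvApplyW]
    simp only [Prod.mk.injEq, true_and]
    exact ⟨by omega, by omega⟩
  | case2 path step pos h =>
    rw [fillPhase, if_neg h]
    have hc : max 0 (min ((path.length : Int) - step) (grid_size - 1 - pos)) = 0 := by
      push_neg at h
      rcases lt_or_ge step (path.length : Int) with h1 | h1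
      · have := h h1; omega
      · omega
    rw [hc]
    simp [pvApplyW]

theorem foldl_setNone_eq (b : Int) : ∀ (a : Int) (path : List (Option String)),
    (PySem.List.pyRange a b 1).foldl (fun p i => PySem.List.pySetD p i (none : Option String)) path
      = pvApplyW (List.replicate (b - a).toNat none) a path := by
  intro a path
  by_cases hab : b ≤ a
  · rw [PySem.List.pyRange_one_eq_nil hab]
    have : (b - a).toNat = 0 := by omega
    simp [this, pvApplyW]
  · push_neg at hab
    have hmeas : (b - (a + 1)).toNat < (b - a).toNat := by omega
    rw [PySem.List.pyRange_one_cons hab]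
    simp only [List.foldl_cons]
    rw [foldl_setNone_eq b (a + 1) (PySem.List.pySetD path a none)]
    have : (b - a).toNat = (b - (a + 1)).toNat + 1 := by omega
    rw [this, List.replicate_succ]
    rfl
termination_by a => (b - a).toNat

theorem pvApplyW_eq : ∀ (seq : List (Option String)) (s : Int) (path : List (Option String)),
    -(path.length : Int) ≤ s → (seq.length : Int) = (path.length : Int) - s →
    pvApplyW seq s path = path.take s.toNat ++ seq.drop ((max s 0) - s).toNat := by
  intro seq
  induction seq with
  | nil =>
    intro s path hpre hlen
    simp only [List.length_nil, Nat.cast_zero] at hlen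
    have : path.length ≤ s.toNat := by omega
    simp [pvApplyW, List.take_of_length_le this]
  | cons v vs ih =>
    intro s path hpre hlen
    simp only [List.length_cons] at hlen
    have hslt : s < (path.length : Int) := by push_cast at hlen; omega
    simp only [pvApplyW]
    have hlen' : ((PySem.List.pySetD path s v).length : Int) = (path.length : Int) := by
      simp [PySem.List.length_pySetD]
    rw [ih (s + 1) (PySem.List.pySetD path s v) (by omega) (by push_cast at hlen ⊢; omega)]
    by_cases hs : 0 ≤ s
    · -- in-range nonnegative write
      rw [PySem.List.pySetD_of_nonneg path v hs]
      have hmax1 : max (s + 1) 0 - (s + 1) = 0 := by omega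
      have hmax0 : max s 0 - s = 0 := by omega
      have hsn : (s + 1).toNat = s.toNat + 1 := by omega
      have hlt : s.toNat < path.length := by omega
      rw [hmax1, hmax0, hsn]
      rw [List.set_eq_take_append_cons_drop, if_pos hlt]
      rw [List.take_append]
      have h1 : (path.take s.toNat).length = s.toNat := by
        simp [List.length_take]; omega
      rw [List.take_of_length_le (by omega : (path.take s.toNat).length ≤ s.toNat + 1)]
      rw [h1]
      simp
    · -- negative index: the prefix written now is dropped anyway
      push_neg at hs
      have h1 : (s + 1).toNat = 0 := by omega
      have h0 : s.toNat = 0 := by omega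
      rw [h1, h0]
      simp only [List.take_zero, List.nil_append]
      have h2 : (max (s + 1) 0 - (s + 1)).toNat = (-s - 1).toNat := by omega
      have h3 : (max s 0 - s).toNat = (-s - 1).toNat + 1 := by omega
      rw [h2, h3, List.drop_succ_cons]

-- ===== VERDICT (by name: the statement is the Claim_ definition above) =====
theorem fill_rest_py_spec : Claim_equal_fill_rest_py := by
  intro path grid_size step x_pos y_pos hdom hpre
  unfold Pre_fill_rest_py at hpre
  unfold Spec_fill_rest_py
  unfold fill_rest_py fill_rest_py_alt
  set n : Int := (path.length : Int) with hn
  set r := max 0 (min (n - step) (grid_size - 1 - x_pos)) with hr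
  rw [fillPhase_eq]
  simp only [← hn, ← hr]
  set p1 := pvApplyW (List.replicate r.toNat (some "R")) step path with hp1
  have hp1len : ((p1.length : Int)) = n := by rw [hp1, length_pvApplyW]
  rw [fillPhase_eq]
  rw [hp1len]
  set u := max 0 (min (n - (step + r)) (grid_size - 1 - y_pos)) with hu
  set p2 := pvApplyW (List.replicate u.toNat (some "U")) (step + r) p1 with hp2
  have hp2len : ((p2.length : Int)) = n := by rw [hp2, length_pvApplyW, hp1len]
  rw [hp2len, foldl_setNone_eq]
  -- assemble the three phases into one write sequence
  have hr0 : 0 ≤ r := by omega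
  have hu0 : 0 ≤ u := by omega
  have hassemble :
      pvApplyW (List.replicate (n - (step + r + u)).toNat none) (step + r + u) p2
        = pvApplyW (List.replicate r.toNat (some "R") ++ List.replicate u.toNat (some "U")
            ++ List.replicate (n - (step + r + u)).toNat none) step path := by
    rw [pvApplyW_append, pvApplyW_append]
    simp only [List.length_replicate, List.length_append]
    have e1 : step + (r.toNat : Int) = step + r := by omega
    rw [e1]
    have e2 : step + ((r.toNat + u.toNat : Nat) : Int) = step + r + u := by omega
    rw [e2, ← hp1, ← hp2]
  rw [hassemble]
  by_cases htot : n - step ≤ 0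
  · -- nothing to write: all three segments are empty
    have hre : r = 0 := by omega
    have hue : u = 0 := by omega
    have hme : (n - (step + r + u)).toNat = 0 := by omega
    rw [if_pos htot]
    have hz : (n - step).toNat = 0 := by omega
    simp [hre, hue, hz, pvApplyW]
  · rw [if_neg htot]
    push_neg at htot
    -- A's segment lengths coincide with B's
    have hrB : min (n - step) (max 0 (grid_size - 1 - x_pos)) = r := by omega
    have huB : min (n - step - r) (max 0 (grid_size - 1 - y_pos)) = u := by omega
    have hmB : (n - step - r - u) = n - (step + r + u) := by omega
    rw [pvApplyW_eq _ step path (by omega) (by simp [List.length_replicate]; push_cast; omega)]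
    rw [hrB, huB, hmB]
    have hstart : (max step 0).toNat = step.toNat := by omega
    rw [hstart]
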